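-- pv_equiv track=rewrite | github.com/mayongtian/connect-4-minimax | minimax.py | NUM_IN_A_ROW
-- ===== SOURCE A (Python) =====
-- def NUM_IN_A_ROW(count: int, state: [[int]], player: int):
--     """
--     Helper function for Utility to find the winner, provided implementation takes too long for ED test cases
--
--     Parameters:
--         count (int): The length of the sequence to look for (e.g., 2, 3, or 4).
--         state ([[int]]): The board state as a 2D list in column-major order.
--         player (int): The player's token (1 for red, -1 for yellow).
--
--     Returns:
--         int: The total number of occurrences where the player has 'count' in a row.
--     """
--     num_rows = 6
--     num_columns =7
--     total_matches = 0
--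
--     #check each column
--     for col in range(num_columns):
--         #max starting position
--         for start_row in range(num_rows - count + 1):
--             #count number of possibilities
--             if all(state[col][start_row + offset] == player for offset in range(count)):
--                 total_matches+= 1
--
--     # check each row
--     for start_col in range(num_columns - count + 1):
--         for row in range(num_rows):
--             if all(state[start_col + offset][row] == player for offset in range(count)):
--                 total_matches += 1
--
--     #  from left to right column, check each row diagonally from bottom-left to top right
--     for start_col in range(num_columns - count + 1):
--         for start_row in range(num_rows - count + 1):
--             # starts (0,0), (1,1) ...., then
--             if all(state[start_col + offset][start_row + offset] == player for offset in range(count)):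
--                 total_matches += 1
--
--      #  from left to right column, check each row diagonally from top left to bottom right
--     for start_col in range(num_columns - count + 1):
--         for start_row in range(count - 1, num_rows):
--             if all(state[start_col + offset][start_row - offset] == player for offset in range(count)):
--                 total_matches += 1
--
--     return total_matches
-- ===== SOURCE B (Python) =====
-- def _run(state, player, col, row, dc, dr):
--     """Length of the consecutive run of player tokens ending at (col, row), looking
--     back along direction (dc, dr)."""
--     if col < 0 or row < 0 or col >= len(state) or row >= len(state[col]) \
--             or state[col][row] != player:
--         return 0
--     return _run(state, player, col - dc, row - dr, dc, dr) + 1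
--
--
-- def NUM_IN_A_ROW(count: int, state: [[int]], player: int):
--     """Count the windows by their END cell: a count-in-a-row ends at a cell exactly
--     when the run of player tokens ending there (along the window's direction) reaches
--     length count.  Each end-cell range requires the window's start cell to lie on the
--     6-row x 7-column board."""
--     total = 0
--     # vertical: a window ending at (col, row) starts at (col, row - count + 1)
--     for col in range(7):
--         for row in range(count - 1, 6):
--             if _run(state, player, col, row, 0, 1) >= count:
--                 total += 1
--     # horizontal
--     for col in range(count - 1, 7):
--         for row in range(6):
--             if _run(state, player, col, row, 1, 0) >= count:
--                 total += 1
--     # rising diagonals (bottom-left to top-right)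
--     for col in range(count - 1, 7):
--         for row in range(count - 1, 6):
--             if _run(state, player, col, row, 1, 1) >= count:
--                 total += 1
--     # falling diagonals (top-left to bottom-right)
--     for col in range(count - 1, 7):
--         for row in range(0, 7 - count):
--             if _run(state, player, col, row, 1, -1) >= count:
--                 total += 1
--     return total
-- ===== Notes on version B (the rewrite author's own statement) =====
-- stated objective: alternative
-- what changed: B counts each window at its END cell by computing, with one recursive helper, the run length of player tokens ending there along the window's direction (run >= count means exactly one window ends there), replacing A's four nested window nests that re-scan every window with all(); Pre_ excludes only boards missing cells of the 7x6 grid while 1 <= count <= 7, where A usually raises IndexError and returns only when every probe short-circuits at a mismatching present cell (and where it does return, B agrees anyway).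
import Mathlib
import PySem

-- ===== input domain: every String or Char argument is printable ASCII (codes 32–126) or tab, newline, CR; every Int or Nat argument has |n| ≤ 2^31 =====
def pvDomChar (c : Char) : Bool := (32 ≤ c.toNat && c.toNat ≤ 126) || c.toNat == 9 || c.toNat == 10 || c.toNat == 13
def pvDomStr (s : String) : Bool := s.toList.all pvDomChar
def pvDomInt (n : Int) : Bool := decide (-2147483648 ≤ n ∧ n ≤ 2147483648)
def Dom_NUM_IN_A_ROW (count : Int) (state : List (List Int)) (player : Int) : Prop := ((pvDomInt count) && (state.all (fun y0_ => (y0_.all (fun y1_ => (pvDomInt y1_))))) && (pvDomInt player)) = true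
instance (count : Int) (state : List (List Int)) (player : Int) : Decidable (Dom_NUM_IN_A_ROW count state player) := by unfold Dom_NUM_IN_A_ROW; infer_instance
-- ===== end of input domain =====

-- B counts each window at its END cell via a recursive run length of player tokens,
-- instead of A's four nested window-rescan loops with all().

-- shared indexing helper: state[i][j]; exact where Python's indexing succeeds
def pyCell (state : List (List Int)) (i j : Int) : Int :=
  PySem.List.pyGetD (PySem.List.pyGetD state i []) j 0

-- ===== PORT A =====
def NUM_IN_A_ROW (count : Int) (state : List (List Int)) (player : Int) : Int :=
  -- num_rows = 6, num_columns = 7, total_matches = 0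
  -- check each column
  let t1 : Int := (PySem.List.pyRange 0 7 1).foldl (fun total_matches col =>
      (PySem.List.pyRange 0 (6 - count + 1) 1).foldl (fun total_matches start_row =>
        if (PySem.List.pyRange 0 count 1).all
            (fun offset => pyCell state col (start_row + offset) == player)
        then total_matches + 1 else total_matches) total_matches) 0
  -- check each row
  let t2 : Int := (PySem.List.pyRange 0 (7 - count + 1) 1).foldl (fun total_matches start_col =>
      (PySem.List.pyRange 0 6 1).foldl (fun total_matches row =>
        if (PySem.List.pyRange 0 count 1).all
            (fun offset => pyCell state (start_col + offset) row == player)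
        then total_matches + 1 else total_matches) total_matches) t1
  -- diagonals bottom-left to top-right
  let t3 : Int := (PySem.List.pyRange 0 (7 - count + 1) 1).foldl (fun total_matches start_col =>
      (PySem.List.pyRange 0 (6 - count + 1) 1).foldl (fun total_matches start_row =>
        if (PySem.List.pyRange 0 count 1).all
            (fun offset => pyCell state (start_col + offset) (start_row + offset) == player)
        then total_matches + 1 else total_matches) total_matches) t2
  -- diagonals top-left to bottom-right
  let t4 : Int := (PySem.List.pyRange 0 (7 - count + 1) 1).foldl (fun total_matches start_col =>
      (PySem.List.pyRange (count - 1) 6 1).foldl (fun total_matches start_row =>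
        if (PySem.List.pyRange 0 count 1).all
            (fun offset => pyCell state (start_col + offset) (start_row - offset) == player)
        then total_matches + 1 else total_matches) total_matches) t3
  t4

-- ===== PORT B =====
-- the stopping condition of Python's _run (its or-chain, in order)
def pvStop (state : List (List Int)) (player col row : Int) : Bool :=
  decide (col < 0 ∨ row < 0 ∨ PySem.List.len state ≤ col
    ∨ PySem.List.len (PySem.List.pyGetD state col []) ≤ row
    ∨ PySem.List.pyGetD (PySem.List.pyGetD state col []) row 0 ≠ player)

-- _run with a fuel argument (a totality guard only: every call B makes stops within
-- 24 steps, since col ≤ 6 and row ≤ 5 there and each step shrinks 2*col + row)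
def pvRunF (state : List (List Int)) (player dc dr : Int) : Nat → Int → Int → Int
  | 0, _, _ => 0
  | (f + 1), col, row =>
      if pvStop state player col row then 0
      else pvRunF state player dc dr f (col - dc) (row - dr) + 1

def pvRun (state : List (List Int)) (player col row dc dr : Int) : Int :=
  pvRunF state player dc dr 24 col row

def NUM_IN_A_ROW_alt (count : Int) (state : List (List Int)) (player : Int) : Int :=
  -- vertical: a window ending at (col, row) starts at (col, row - count + 1)
  let t1 : Int := (PySem.List.pyRange 0 7 1).foldl (fun total col =>
      (PySem.List.pyRange (count - 1) 6 1).foldl (fun total row =>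
        if count ≤ pvRun state player col row 0 1 then total + 1 else total) total) 0
  -- horizontal
  let t2 : Int := (PySem.List.pyRange (count - 1) 7 1).foldl (fun total col =>
      (PySem.List.pyRange 0 6 1).foldl (fun total row =>
        if count ≤ pvRun state player col row 1 0 then total + 1 else total) total) t1
  -- rising diagonals (bottom-left to top-right)
  let t3 : Int := (PySem.List.pyRange (count - 1) 7 1).foldl (fun total col =>
      (PySem.List.pyRange (count - 1) 6 1).foldl (fun total row =>
        if count ≤ pvRun state player col row 1 1 then total + 1 else total) total) t2
  -- falling diagonals (top-left to bottom-right)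
  let t4 : Int := (PySem.List.pyRange (count - 1) 7 1).foldl (fun total col =>
      (PySem.List.pyRange 0 (7 - count) 1).foldl (fun total row =>
        if count ≤ pvRun state player col row 1 (-1) then total + 1 else total) total) t3
  t4

-- ===== PRECONDITION & SPEC =====
-- Pre_ excludes only boards missing cells of the 7x6 grid while 1 ≤ count ≤ 7: there A
-- usually raises IndexError and returns only when every probe short-circuits at a
-- mismatching present cell (and where it does return, B agrees anyway).  For count ≤ 0
-- and count ≥ 8 neither program reads the board, so every board is admitted.
def Pre_NUM_IN_A_ROW (count : Int) (state : List (List Int)) (player : Int) : Prop :=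
  count ≤ 0 ∨ 8 ≤ count ∨ (7 ≤ state.length ∧ ∀ col ∈ state.take 7, 6 ≤ col.length)
instance (count : Int) (state : List (List Int)) (player : Int) : Decidable (Pre_NUM_IN_A_ROW count state player) := by unfold Pre_NUM_IN_A_ROW; infer_instance

def pvWitness_NUM_IN_A_ROW : Int × List (List Int) × Int :=
  (4, [[1,1,1,1,0,0],[0,1,0,0,0,0],[0,0,1,0,0,0],[0,0,0,1,0,0],[1,1,1,1,1,0],[0,0,0,0,0,0],[1,0,0,0,0,0]], 1)

def Spec_NUM_IN_A_ROW (count : Int) (state : List (List Int)) (player : Int) (out : Int) : Prop := out = NUM_IN_A_ROW_alt count state player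
instance (count : Int) (state : List (List Int)) (player : Int) (out : Int) : Decidable (Spec_NUM_IN_A_ROW count state player out) := by unfold Spec_NUM_IN_A_ROW; infer_instance

-- ===== CLAIM (what is proved, stated in full; the proofs are below) =====
def Claim_equal_NUM_IN_A_ROW : Prop := ∀ (count : Int) (state : List (List Int)) (player : Int), Dom_NUM_IN_A_ROW count state player → Pre_NUM_IN_A_ROW count state player → Spec_NUM_IN_A_ROW count state player (NUM_IN_A_ROW count state player)

-- ===== LEMMAS AND PROOFS =====

lemma pvCountP_congr {l : List Int} {p q : Int → Bool} (h : ∀ x ∈ l, p x = q x) :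
    l.countP p = l.countP q :=
  List.countP_congr (fun x hx => by rw [h x hx])

lemma pvAll_congr {l : List Int} {p q : Int → Bool} (h : ∀ x ∈ l, p x = q x) :
    l.all p = l.all q := by
  induction l with
  | nil => rfl
  | cons x t ih =>
      rw [List.all_cons, List.all_cons, h x (List.mem_cons_self),
        ih (fun y hy => h y (List.mem_cons_of_mem x hy))]

lemma pvRunF_nonneg (state : List (List Int)) (player dc dr : Int) :
    ∀ (f : Nat) (col row : Int), 0 ≤ pvRunF state player dc dr f col row := by
  intro f
  induction f with
  | zero => intro col row; simp [pvRunF]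
  | succ f ih =>
      intro col row
      rw [pvRunF]
      split
      · omega
      · have := ih (col - dc) (row - dr); omega

-- the four directions B uses, and the measure each of them shrinks
def pvDirOK (dc dr : Int) : Prop :=
  (dc = 0 ∧ dr = 1) ∨ (dc = 1 ∧ (dr = -1 ∨ dr = 0 ∨ dr = 1))

-- characterisation: the run reaches j+1 iff the j+1 probes back along the direction
-- all stop nowhere (are on the board and equal to player)
lemma pvRunF_lt_iff (state : List (List Int)) (player dc dr : Int) (hd : pvDirOK dc dr) :
    ∀ (j : Nat) (f : Nat) (col row : Int), (2 * col + row + 3).toNat ≤ f →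
      ((j : Int) < pvRunF state player dc dr f col row ↔
        ∀ o : Nat, o ≤ j → ¬ pvStop state player (col - o * dc) (row - o * dr)) := by
  intro j
  induction j with
  | zero =>
      intro f col row hmu
      constructor
      · intro h o ho
        have ho0 : o = 0 := by omega
        subst ho0
        intro hstop
        simp only [Nat.cast_zero, zero_mul, sub_zero] at hstop
        cases f with
        | zero => simp [pvRunF] at h
        | succ f => rw [pvRunF, if_pos hstop] at h; omega
      · intro h
        have h0 := h 0 (le_refl 0)
        simp only [Nat.cast_zero, zero_mul, sub_zero] at h0
        cases f with
        | zero =>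
            exfalso
            apply h0
            unfold pvStop
            rw [decide_eq_true_eq]
            by_contra hcon
            push Not at hcon
            omega
        | succ f =>
            rw [pvRunF, if_neg h0]
            have := pvRunF_nonneg state player dc dr f (col - dc) (row - dr)
            push_cast
            omega
  | succ j ih =>
      intro f col row hmu
      cases f with
      | zero =>
          constructor
          · intro h; simp [pvRunF] at h; omega
          · intro h
            exfalso
            apply h 0 (by omega)
            simp only [Nat.cast_zero, zero_mul, sub_zero]
            unfold pvStop
            rw [decide_eq_true_eq]
            by_contra hcon
            push Not at hcon
            omega
      | succ f =>
        constructor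
        · intro h o ho
          by_cases hstop : pvStop state player col row
          · rw [pvRunF, if_pos hstop] at h; omega
          · rw [pvRunF, if_neg hstop] at h
            have hok : 0 ≤ col ∧ 0 ≤ row := by
              unfold pvStop at hstop
              rw [decide_eq_true_eq] at hstop
              push Not at hstop
              exact ⟨hstop.1, hstop.2.1⟩
            have hstep : (2 * (col - dc) + (row - dr) + 3).toNat ≤ f := by
              rcases hd with ⟨h1, h2⟩ | ⟨h1, h2⟩ <;> omega
            have hj : (j : Int) < pvRunF state player dc dr f (col - dc) (row - dr) := by
              push_cast at h ⊢; omega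
            cases o with
            | zero => simpa using hstop
            | succ o =>
                have := (ih f (col - dc) (row - dr) hstep).mp hj o (by omega)
                have harg1 : col - dc - o * dc = col - (o + 1 : Nat) * dc := by push_cast; ring
                have harg2 : row - dr - o * dr = row - (o + 1 : Nat) * dr := by push_cast; ring
                rw [harg1, harg2] at this
                exact this
        · intro h
          have hstop : ¬ pvStop state player col row := by
            have h0 := h 0 (by omega)
            simpa using h0
          rw [pvRunF, if_neg hstop]
          have hok : 0 ≤ col ∧ 0 ≤ row := by
            unfold pvStop at hstop
            rw [decide_eq_true_eq] at hstop
            push Not at hstop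
            exact ⟨hstop.1, hstop.2.1⟩
          have hstep : (2 * (col - dc) + (row - dr) + 3).toNat ≤ f := by
            rcases hd with ⟨h1, h2⟩ | ⟨h1, h2⟩ <;> omega
          have hj : (j : Int) < pvRunF state player dc dr f (col - dc) (row - dr) := by
            rw [ih f (col - dc) (row - dr) hstep]
            intro o ho
            have := h (o + 1) (by omega)
            have harg1 : col - (o + 1 : Nat) * dc = col - dc - o * dc := by push_cast; ring
            have harg2 : row - (o + 1 : Nat) * dr = row - dr - o * dr := by push_cast; ring
            rw [harg1, harg2] at this
            exact this
          push_cast at hj ⊢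
          omega

-- counting over a shifted window-start / window-end range
lemma pvCountP_shift (a b t : Int) (p q : Int → Bool)
    (h : ∀ x : Int, a ≤ x → x < b → p x = q (x + t)) :
    (PySem.List.pyRange a b 1).countP p = (PySem.List.pyRange (a + t) (b + t) 1).countP q := by
  rw [PySem.List.pyRange_one a b, PySem.List.pyRange_one (a + t) (b + t),
    List.countP_map, List.countP_map]
  have hn : (b + t - (a + t)).toNat = (b - a).toNat := by omega
  rw [hn]
  apply List.countP_congr
  intro k hk
  rw [List.mem_range] at hk
  simp only [Function.comp_apply]
  have hx : p (a + (k : Int)) = q ((a + (k : Int)) + t) := h _ (by omega) (by omega)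
  rw [hx]
  constructor <;> intro hh <;> [rw [show a + t + (k : Int) = a + (k : Int) + t by ring]; rw [show a + (k : Int) + t = a + t + (k : Int) by ring]] <;> exact hh

lemma pvSumMap_shift (a b t : Int) (f g : Int → Int)
    (h : ∀ x : Int, a ≤ x → x < b → f x = g (x + t)) :
    ((PySem.List.pyRange a b 1).map f).sum = ((PySem.List.pyRange (a + t) (b + t) 1).map g).sum := by
  rw [PySem.List.pyRange_one a b, PySem.List.pyRange_one (a + t) (b + t),
    List.map_map, List.map_map]
  have hn : (b + t - (a + t)).toNat = (b - a).toNat := by omega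
  rw [hn]
  apply congrArg List.sum
  apply List.map_congr_left
  intro k hk
  rw [List.mem_range] at hk
  simp only [Function.comp_apply]
  rw [h _ (by omega) (by omega), show a + t + (k : Int) = a + (k : Int) + t by ring]

-- on a full 7x6 grid and inside it, Python's stopping test is just the cell probe
lemma pvStop_iff (state : List (List Int)) (player c r : Int)
    (hlen : 7 ≤ state.length) (hcols : ∀ col ∈ state.take 7, 6 ≤ col.length)
    (hc : 0 ≤ c) (hc7 : c < 7) (hr : 0 ≤ r) (hr6 : r < 6) :
    (¬ pvStop state player c r) ↔ (pyCell state c r == player) = true := by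
  have hclen : c < (state.length : Int) := by omega
  have hcol : PySem.List.pyGetD state c [] = state[c.toNat] :=
    PySem.List.pyGetD_eq_getElem state [] hc (by omega)
  have hmem : state[c.toNat] ∈ state.take 7 := by
    have h7 : c.toNat < 7 := by omega
    have hlt : c.toNat < (state.take 7).length := by
      rw [List.length_take]; omega
    have := List.getElem_mem (l := state.take 7) (n := c.toNat) hlt
    rwa [List.getElem_take] at this
  have hcl : 6 ≤ state[c.toNat].length := hcols _ hmem
  unfold pvStop pyCell
  rw [hcol]
  simp only [PySem.List.len_eq, decide_eq_true_eq]
  constructor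
  · intro h
    push Not at h
    have := h.2.2.2.2
    rw [PySem.List.pyGetD_eq_getElem state[c.toNat] 0 hr (by omega)] at this
    rw [PySem.List.pyGetD_eq_getElem state[c.toNat] 0 hr (by omega)]
    simp only [beq_iff_eq]
    omega
  · intro h hcontra
    rw [PySem.List.pyGetD_eq_getElem state[c.toNat] 0 hr (by omega), beq_iff_eq] at h
    rcases hcontra with h1 | h1 | h1 | h1 | h1
    · omega
    · omega
    · omega
    · omega
    · rw [PySem.List.pyGetD_eq_getElem state[c.toNat] 0 hr (by omega)] at h1
      exact h1 h

-- the end-cell run test is A's window probe at the window's start cell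
lemma pvWindow_iff (state : List (List Int)) (player count dc dr sc sr ec er : Int)
    (hlen : 7 ≤ state.length) (hcols : ∀ col ∈ state.take 7, 6 ≤ col.length)
    (hd : pvDirOK dc dr) (hc1 : 1 ≤ count) (hc7 : count ≤ 7)
    (hec : ec = sc + (count - 1) * dc) (her : er = sr + (count - 1) * dr)
    (hgrid : ∀ o : Int, 0 ≤ o → o < count →
      0 ≤ sc + o * dc ∧ sc + o * dc < 7 ∧ 0 ≤ sr + o * dr ∧ sr + o * dr < 6) :
    decide (count ≤ pvRun state player ec er dc dr)
      = (PySem.List.pyRange 0 count 1).all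
          (fun o => pyCell state (sc + o * dc) (sr + o * dr) == player) := by
  have hbound : 0 ≤ ec ∧ ec < 7 ∧ 0 ≤ er ∧ er < 6 := by
    have := hgrid (count - 1) (by omega) (by omega)
    constructor; · omega
    constructor; · omega
    constructor; · omega
    · omega
  have hmu : (2 * ec + er + 3).toNat ≤ 24 := by omega
  have hiff := pvRunF_lt_iff state player dc dr hd (count.toNat - 1) 24 ec er hmu
  have hcast : ((count.toNat - 1 : Nat) : Int) = count - 1 := by omega
  rw [hcast] at hiff
  have hrun : count ≤ pvRun state player ec er dc dr ↔
      ∀ o : Nat, o ≤ count.toNat - 1 →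
        ¬ pvStop state player (ec - o * dc) (er - o * dr) := by
    unfold pvRun
    constructor
    · intro hle; exact hiff.mp (by omega)
    · intro hall; have := hiff.mpr hall; omega
  apply Bool.eq_iff_iff.mpr
  rw [decide_eq_true_eq, List.all_eq_true, hrun]
  constructor
  · intro h o ho
    rw [PySem.List.mem_pyRange_one] at ho
    have hh := h (count - 1 - o).toNat (by omega)
    have h1 : ec - ((count - 1 - o).toNat : Int) * dc = sc + o * dc := by
      have : ((count - 1 - o).toNat : Int) = count - 1 - o := by omega
      rw [this, hec]; ring
    have h2 : er - ((count - 1 - o).toNat : Int) * dr = sr + o * dr := by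
      have : ((count - 1 - o).toNat : Int) = count - 1 - o := by omega
      rw [this, her]; ring
    rw [h1, h2] at hh
    have hg := hgrid o ho.1 ho.2
    exact (pvStop_iff state player _ _ hlen hcols hg.1 hg.2.1 hg.2.2.1 hg.2.2.2).mp hh
  · intro h o ho
    have hoc : (0 : Int) ≤ count - 1 - o ∧ count - 1 - o < count := by omega
    have hh := h (count - 1 - (o : Int)) (by rw [PySem.List.mem_pyRange_one]; omega)
    have h1 : ec - (o : Int) * dc = sc + (count - 1 - o) * dc := by rw [hec]; ring
    have h2 : er - (o : Int) * dr = sr + (count - 1 - o) * dr := by rw [her]; ring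
    rw [h1, h2]
    have hg := hgrid (count - 1 - o) hoc.1 hoc.2
    exact (pvStop_iff state player _ _ hlen hcols hg.1 hg.2.1 hg.2.2.1 hg.2.2.2).mpr hh

-- ===== VERDICT (by name: the statement is the Claim_ definition above) =====
theorem NUM_IN_A_ROW_spec : Claim_equal_NUM_IN_A_ROW := by
  intro count state player _ hPre
  unfold Spec_NUM_IN_A_ROW NUM_IN_A_ROW NUM_IN_A_ROW_alt
  by_cases hc0 : count ≤ 0
  · -- every probe range of A is empty (all() is vacuously true) and every run test of B
    -- holds (a run of nonpositive length ends anywhere): both count full rectangles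
    have hBtrue : ∀ col row dc dr : Int,
        decide (count ≤ pvRun state player col row dc dr) = true := by
      intro col row dc dr
      apply decide_eq_true
      have := pvRunF_nonneg state player dc dr 24 col row
      unfold pvRun
      omega
    simp only [PySem.List.foldl_if_add_one, PySem.List.foldl_ite_add_one, PySem.List.foldl_add]
    simp only [PySem.List.pyRange_one_eq_nil (a := (0 : Int)) (b := count) hc0, List.all_nil,
      hBtrue, List.countP_true, PySem.List.length_pyRange_one, PySem.List.sum_map_const_int]
    rw [show ((7 - 0 : Int).toNat : Int) = 7 by omega,
      show ((6 - 0 : Int).toNat : Int) = 6 by omega,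
      show ((6 - count + 1 - 0).toNat : Int) = 7 - count by omega,
      show ((7 - count + 1 - 0).toNat : Int) = 8 - count by omega,
      show ((6 - (count - 1)).toNat : Int) = 7 - count by omega,
      show ((7 - (count - 1)).toNat : Int) = 8 - count by omega,
      show ((7 - count - 0).toNat : Int) = 7 - count by omega]
  · by_cases hc8 : 8 ≤ count
    · -- all of A's start ranges and all of B's end ranges are empty
      simp only [PySem.List.pyRange_one_eq_nil (a := (0 : Int)) (b := 6 - count + 1) (by omega),
        PySem.List.pyRange_one_eq_nil (a := (0 : Int)) (b := 7 - count + 1) (by omega),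
        PySem.List.pyRange_one_eq_nil (a := count - 1) (b := (6 : Int)) (by omega),
        PySem.List.pyRange_one_eq_nil (a := count - 1) (b := (7 : Int)) (by omega),
        List.foldl_nil, PySem.List.foldl_ignore]
    · have hc1 : 1 ≤ count := by omega
      have hc7 : count ≤ 7 := by omega
      have hshape : 7 ≤ state.length ∧ ∀ col ∈ state.take 7, 6 ≤ col.length := by
        rcases hPre with h | h | h
        · omega
        · omega
        · exact h
      obtain ⟨hlen, hcols⟩ := hshape
      simp only [PySem.List.foldl_if_add_one, PySem.List.foldl_ite_add_one, PySem.List.foldl_add]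
      have hV : ((PySem.List.pyRange 0 7 1).map (fun col =>
            ((PySem.List.pyRange 0 (6 - count + 1) 1).countP (fun sr =>
              (PySem.List.pyRange 0 count 1).all
                (fun offset => pyCell state col (sr + offset) == player)) : Int))).sum
          = ((PySem.List.pyRange 0 7 1).map (fun col =>
              ((PySem.List.pyRange (count - 1) 6 1).countP (fun er =>
                decide (count ≤ pvRun state player col er 0 1)) : Int))).sum := by
        apply congrArg List.sum
        apply List.map_congr_left
        intro col hcol
        rw [PySem.List.mem_pyRange_one] at hcol
        congr 1
        have hsh := pvCountP_shift 0 (6 - count + 1) (count - 1)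
            (fun sr => (PySem.List.pyRange 0 count 1).all
              (fun offset => pyCell state col (sr + offset) == player))
            (fun er => decide (count ≤ pvRun state player col er 0 1))
            (by
              intro sr h1 h2
              simp only []
              rw [pvWindow_iff state player count 0 1 col sr col (sr + (count - 1))
                  hlen hcols (Or.inl ⟨rfl, rfl⟩) hc1 hc7 (by ring) (by ring)
                  (by
                    intro o ho1 ho2
                    rw [show col + o * 0 = col by ring, show sr + o * 1 = sr + o by ring]
                    omega)]
              apply pvAll_congr
              intro o ho
              rw [show col + o * 0 = col by ring, show sr + o * 1 = sr + o by ring])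
        rw [show (0 : Int) + (count - 1) = count - 1 by ring,
          show 6 - count + 1 + (count - 1) = (6 : Int) by ring] at hsh
        exact hsh
      have hH : ((PySem.List.pyRange 0 (7 - count + 1) 1).map (fun sc =>
            ((PySem.List.pyRange 0 6 1).countP (fun row =>
              (PySem.List.pyRange 0 count 1).all
                (fun offset => pyCell state (sc + offset) row == player)) : Int))).sum
          = ((PySem.List.pyRange (count - 1) 7 1).map (fun ec =>
              ((PySem.List.pyRange 0 6 1).countP (fun row =>
                decide (count ≤ pvRun state player ec row 1 0)) : Int))).sum := by
        have hsh := pvSumMap_shift 0 (7 - count + 1) (count - 1)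
            (fun sc => ((PySem.List.pyRange 0 6 1).countP (fun row =>
              (PySem.List.pyRange 0 count 1).all
                (fun offset => pyCell state (sc + offset) row == player)) : Int))
            (fun ec => ((PySem.List.pyRange 0 6 1).countP (fun row =>
              decide (count ≤ pvRun state player ec row 1 0)) : Int))
            (by
              intro sc h1 h2
              simp only []
              congr 1
              apply pvCountP_congr
              intro row hrow
              rw [PySem.List.mem_pyRange_one] at hrow
              rw [pvWindow_iff state player count 1 0 sc row (sc + (count - 1)) row
                  hlen hcols (Or.inr ⟨rfl, Or.inr (Or.inl rfl)⟩) hc1 hc7 (by ring) (by ring)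
                  (by
                    intro o ho1 ho2
                    rw [show sc + o * 1 = sc + o by ring, show row + o * 0 = row by ring]
                    omega)]
              apply pvAll_congr
              intro o ho
              rw [show sc + o * 1 = sc + o by ring, show row + o * 0 = row by ring])
        rw [show (0 : Int) + (count - 1) = count - 1 by ring,
          show 7 - count + 1 + (count - 1) = (7 : Int) by ring] at hsh
        exact hsh
      have hR : ((PySem.List.pyRange 0 (7 - count + 1) 1).map (fun sc =>
            ((PySem.List.pyRange 0 (6 - count + 1) 1).countP (fun sr =>
              (PySem.List.pyRange 0 count 1).all
                (fun offset => pyCell state (sc + offset) (sr + offset) == player)) : Int))).sum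
          = ((PySem.List.pyRange (count - 1) 7 1).map (fun ec =>
              ((PySem.List.pyRange (count - 1) 6 1).countP (fun er =>
                decide (count ≤ pvRun state player ec er 1 1)) : Int))).sum := by
        have hsh := pvSumMap_shift 0 (7 - count + 1) (count - 1)
            (fun sc => ((PySem.List.pyRange 0 (6 - count + 1) 1).countP (fun sr =>
              (PySem.List.pyRange 0 count 1).all
                (fun offset => pyCell state (sc + offset) (sr + offset) == player)) : Int))
            (fun ec => ((PySem.List.pyRange (count - 1) 6 1).countP (fun er =>
              decide (count ≤ pvRun state player ec er 1 1)) : Int))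
            (by
              intro sc h1 h2
              simp only []
              congr 1
              have hsh2 := pvCountP_shift 0 (6 - count + 1) (count - 1)
                  (fun sr => (PySem.List.pyRange 0 count 1).all
                    (fun offset => pyCell state (sc + offset) (sr + offset) == player))
                  (fun er => decide (count ≤ pvRun state player (sc + (count - 1)) er 1 1))
                  (by
                    intro sr hs1 hs2
                    simp only []
                    rw [pvWindow_iff state player count 1 1 sc sr (sc + (count - 1)) (sr + (count - 1))
                        hlen hcols (Or.inr ⟨rfl, Or.inr (Or.inr rfl)⟩) hc1 hc7 (by ring) (by ring)
                        (by
                          intro o ho1 ho2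
                          rw [show sc + o * 1 = sc + o by ring, show sr + o * 1 = sr + o by ring]
                          omega)]
                    apply pvAll_congr
                    intro o ho
                    rw [show sc + o * 1 = sc + o by ring, show sr + o * 1 = sr + o by ring])
              rw [show (0 : Int) + (count - 1) = count - 1 by ring,
                show 6 - count + 1 + (count - 1) = (6 : Int) by ring] at hsh2
              exact hsh2)
        rw [show (0 : Int) + (count - 1) = count - 1 by ring,
          show 7 - count + 1 + (count - 1) = (7 : Int) by ring] at hsh
        exact hsh
      have hF : ((PySem.List.pyRange 0 (7 - count + 1) 1).map (fun sc =>
            ((PySem.List.pyRange (count - 1) 6 1).countP (fun sr =>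
              (PySem.List.pyRange 0 count 1).all
                (fun offset => pyCell state (sc + offset) (sr - offset) == player)) : Int))).sum
          = ((PySem.List.pyRange (count - 1) 7 1).map (fun ec =>
              ((PySem.List.pyRange 0 (7 - count) 1).countP (fun er =>
                decide (count ≤ pvRun state player ec er 1 (-1))) : Int))).sum := by
        have hsh := pvSumMap_shift 0 (7 - count + 1) (count - 1)
            (fun sc => ((PySem.List.pyRange (count - 1) 6 1).countP (fun sr =>
              (PySem.List.pyRange 0 count 1).all
                (fun offset => pyCell state (sc + offset) (sr - offset) == player)) : Int))
            (fun ec => ((PySem.List.pyRange 0 (7 - count) 1).countP (fun er =>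
              decide (count ≤ pvRun state player ec er 1 (-1))) : Int))
            (by
              intro sc h1 h2
              simp only []
              congr 1
              have hsh2 := pvCountP_shift (count - 1) 6 (-(count - 1))
                  (fun sr => (PySem.List.pyRange 0 count 1).all
                    (fun offset => pyCell state (sc + offset) (sr - offset) == player))
                  (fun er => decide (count ≤ pvRun state player (sc + (count - 1)) er 1 (-1)))
                  (by
                    intro sr hs1 hs2
                    simp only []
                    rw [pvWindow_iff state player count 1 (-1) sc sr (sc + (count - 1)) (sr + -(count - 1))
                        hlen hcols (Or.inr ⟨rfl, Or.inl rfl⟩) hc1 hc7 (by ring) (by ring)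
                        (by
                          intro o ho1 ho2
                          rw [show sc + o * 1 = sc + o by ring,
                            show sr + o * (-1) = sr - o by ring]
                          omega)]
                    apply pvAll_congr
                    intro o ho
                    rw [show sc + o * 1 = sc + o by ring,
                      show sr + o * (-1) = sr - o by ring])
              rw [show count - 1 + -(count - 1) = (0 : Int) by ring,
                show (6 : Int) + -(count - 1) = 7 - count by ring] at hsh2
              exact hsh2)
        rw [show (0 : Int) + (count - 1) = count - 1 by ring,
          show 7 - count + 1 + (count - 1) = (7 : Int) by ring] at hsh
        exact hsh
      rw [hV, hH, hR, hF]
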